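-- pv_equiv track=rewrite | github.com/prosko123/MKTBot | TierMogi.py | generate_scoreboard_table_text
-- ===== SOURCE A (Python) =====
-- from typing import List, Tuple
-- from math import ceil
--
-- alphabet = ["A", "B", "C", "D", "E", "F", "G", "H", "I", "J", "K", "L", "M", "N", "O", "P", "Q", "R", "S", "T", "U", "V", "W", "X", "Y", "Z"]
--
-- def generate_scoreboard_table_text(num_teams:int, players:List[str]) -> str:
--     teams_text = []
--     team_length = ceil(len(players) / num_teams)
--     for i in range(num_teams):
--         team_text = f"Team {i+1} - {alphabet[i]}\n"
--
--         team_players = players[team_length*i:team_length*(i+1)]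
--         for player in team_players:
--             team_text += player + " [] 0|0|0\n"
--         teams_text.append(team_text)
--     return "```#RESULTS\n" + "\n".join(teams_text) + "```"
-- ===== SOURCE B (Python) =====
-- from math import ceil
--
-- alphabet = ["A", "B", "C", "D", "E", "F", "G", "H", "I", "J", "K", "L", "M", "N", "O", "P", "Q", "R", "S", "T", "U", "V", "W", "X", "Y", "Z"]
--
-- def generate_scoreboard_table_text(num_teams, players):
--     teams = [f"Team {i+1} - {alphabet[i]}\n" for i in range(num_teams)]
--     if players:
--         team_length = ceil(len(players) / num_teams)
--         for idx, player in enumerate(players):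
--             teams[idx // team_length] += player + " [] 0|0|0\n"
--     return "```#RESULTS\n" + "\n".join(teams) + "```"
-- ===== Notes on version B (the rewrite author's own statement) =====
-- stated objective: alternative
-- what changed: Instead of slicing players per team inside the team loop, B seeds all team headers first and then makes a single forward pass over enumerate(players), appending each row to bucket idx // team_length.
-- outside the precondition, e.g. on generate_scoreboard_table_text(-1, ['x']): A returns '```#RESULTS\n```', B raises IndexError
import Mathlib
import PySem

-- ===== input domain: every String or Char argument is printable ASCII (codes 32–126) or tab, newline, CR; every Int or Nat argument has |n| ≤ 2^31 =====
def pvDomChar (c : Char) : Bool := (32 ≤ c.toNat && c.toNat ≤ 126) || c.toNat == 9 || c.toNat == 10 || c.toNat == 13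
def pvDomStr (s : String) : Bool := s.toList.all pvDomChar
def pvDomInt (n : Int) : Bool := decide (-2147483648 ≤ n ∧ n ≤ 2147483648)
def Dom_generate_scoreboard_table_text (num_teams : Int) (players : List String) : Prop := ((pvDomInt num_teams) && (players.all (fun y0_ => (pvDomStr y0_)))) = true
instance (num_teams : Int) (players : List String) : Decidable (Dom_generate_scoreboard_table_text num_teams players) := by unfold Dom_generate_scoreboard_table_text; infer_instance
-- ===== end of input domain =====

-- B seeds all team headers, then distributes players in one forward pass by idx // team_length
-- instead of A's per-team slicing (alternative decomposition, same cost).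


-- ===== PORT A =====
def pyAlphabet : List String := ["A", "B", "C", "D", "E", "F", "G", "H", "I", "J", "K", "L", "M", "N", "O", "P", "Q", "R", "S", "T", "U", "V", "W", "X", "Y", "Z"]

-- ceil(len(players) / num_teams): exact for ints of this size, ceil(a/b) = -((-a) // b)
def generate_scoreboard_table_text (num_teams : Int) (players : List String) : String :=
  let team_length : Int := -(PySem.Int.floordiv (-(players.length : Int)) num_teams)
  let teams_text : List String :=
    (PySem.List.pyRange 0 num_teams 1).foldl (fun acc i =>
      let team_text := "Team " ++ PySem.Int.toStr (i + 1) ++ " - " ++ PySem.List.pyGetD pyAlphabet i "" ++ "\n"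
      let team_players := PySem.List.slice players (some (team_length * i)) (some (team_length * (i + 1)))
      let team_text := team_players.foldl (fun t p => t ++ p ++ " [] 0|0|0\n") team_text
      acc ++ [team_text]) []
  "```#RESULTS\n" ++ PySem.Str.join "\n" teams_text ++ "```"

-- ===== PORT B =====
def generate_scoreboard_table_text_alt (num_teams : Int) (players : List String) : String :=
  let teams : List String :=
    (PySem.List.pyRange 0 num_teams 1).map (fun i =>
      "Team " ++ PySem.Int.toStr (i + 1) ++ " - " ++ PySem.List.pyGetD pyAlphabet i "" ++ "\n")
  let teams :=
    if players.isEmpty then teams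
    else
      let team_length : Int := -(PySem.Int.floordiv (-(players.length : Int)) num_teams)
      (PySem.List.enumerate players 0).foldl (fun ts q =>
        PySem.List.pySetD ts (PySem.Int.floordiv q.1 team_length)
          (PySem.List.pyGetD ts (PySem.Int.floordiv q.1 team_length) "" ++ q.2 ++ " [] 0|0|0\n")) teams
  "```#RESULTS\n" ++ PySem.Str.join "\n" teams ++ "```"

-- ===== PRECONDITION & SPEC =====
-- Pre_ restricts to the natural domain 1..26 teams: at num_teams = 0 A raises ZeroDivisionError, above 26
-- it raises IndexError on the alphabet, and for negative num_teams A's "```#RESULTS\n```" (ignoring the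
-- players entirely) is an accident of range() over a negative count, where B raises IndexError.
def Pre_generate_scoreboard_table_text (num_teams : Int) (players : List String) : Prop :=
  1 ≤ num_teams ∧ num_teams ≤ 26
instance (num_teams : Int) (players : List String) : Decidable (Pre_generate_scoreboard_table_text num_teams players) := by unfold Pre_generate_scoreboard_table_text; infer_instance
def pvWitness_generate_scoreboard_table_text : Int × List String := (2, ["ann", "bob", "cy"])

def Spec_generate_scoreboard_table_text (num_teams : Int) (players : List String) (out : String) : Prop := out = generate_scoreboard_table_text_alt num_teams players
instance (num_teams : Int) (players : List String) (out : String) : Decidable (Spec_generate_scoreboard_table_text num_teams players out) := by unfold Spec_generate_scoreboard_table_text; infer_instance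

-- ===== CLAIM (what is proved, stated in full; the proofs are below) =====
def Claim_equal_generate_scoreboard_table_text : Prop := ∀ (num_teams : Int) (players : List String), Dom_generate_scoreboard_table_text num_teams players → Pre_generate_scoreboard_table_text num_teams players → Spec_generate_scoreboard_table_text num_teams players (generate_scoreboard_table_text num_teams players)


-- ===== LEMMAS AND PROOFS =====

-- concatenation of the per-player rows, in order
def pvRows : List String → String
  | [] => ""
  | p :: ps => p ++ " [] 0|0|0\n" ++ pvRows ps

-- rows contributed to team i by players indexed from k onward (B's distribution rule idx / L = i)
def pvBody (L i : Nat) : Nat → List String → String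
  | _, [] => ""
  | k, p :: ps => (if k / L = i then p ++ " [] 0|0|0\n" else "") ++ pvBody L i (k + 1) ps

theorem pvFoldl_rows (xs : List String) : ∀ h : String,
    xs.foldl (fun t p => t ++ p ++ " [] 0|0|0\n") h = h ++ pvRows xs := by
  induction xs with
  | nil => intro h; simp [pvRows]
  | cons p ps ih =>
    intro h
    simp only [List.foldl_cons]
    rw [ih]
    simp [pvRows, String.append_assoc]

-- pvBody is exactly the rows of A's slice for team i
theorem pvBody_eq (L i : Nat) (hL : 0 < L) : ∀ (ps : List String) (k : Nat),
    pvBody L i k ps = pvRows ((ps.drop (L * i - k)).take (L * (i + 1) - max (L * i) k)) := by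
  intro ps
  induction ps with
  | nil => intro k; simp [pvBody, pvRows]
  | cons p ps ih =>
    intro k
    rcases Nat.lt_or_ge k (L * i) with hk | hk
    · have hne : k / L ≠ i := by
        have : k / L < i := (Nat.div_lt_iff_lt_mul hL).mpr (by nlinarith)
        omega
      have hdrop : L * i - k = (L * i - (k + 1)) + 1 := by omega
      have hmax : max (L * i) k = max (L * i) (k + 1) := by omega
      rw [hdrop, hmax]
      simp only [pvBody, if_neg hne, ih (k + 1), List.drop_succ_cons, String.empty_append]
    · rcases Nat.lt_or_ge k (L * (i + 1)) with hk2 | hk2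
      · have heq : k / L = i := by
          have ha : i ≤ k / L := (Nat.le_div_iff_mul_le hL).mpr (by nlinarith)
          have hb : k / L < i + 1 := (Nat.div_lt_iff_lt_mul hL).mpr (by nlinarith)
          omega
        have hdrop : L * i - k = 0 := by omega
        have htake : L * (i + 1) - max (L * i) k = (L * (i + 1) - (k + 1)) + 1 := by omega
        have hd2 : L * i - (k + 1) = 0 := by omega
        have ht2 : L * (i + 1) - max (L * i) (k + 1) = L * (i + 1) - (k + 1) := by omega
        rw [hdrop, htake]
        simp only [pvBody, if_pos heq, ih (k + 1), hd2, ht2, List.drop_zero,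
          List.take_succ_cons, pvRows, String.append_assoc]
      · have hne : k / L ≠ i := by
          have : i + 1 ≤ k / L := (Nat.le_div_iff_mul_le hL).mpr (by nlinarith)
          omega
        have htake : L * (i + 1) - max (L * i) k = 0 := by omega
        have ht2 : L * (i + 1) - max (L * i) (k + 1) = 0 := by omega
        rw [htake]
        simp only [pvBody, if_neg hne, ih (k + 1), ht2, List.take_zero, pvRows,
          String.empty_append]

-- B's distribution pass, characterised pointwise
theorem pvDist (L : Nat) (hL : 0 < L) :
    ∀ (ps : List String) (k : Nat) (ts : List String),
      (∀ j, j < ps.length → (k + j) / L < ts.length) →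
      ((PySem.List.enumerate ps (k : Int)).foldl
        (fun ts q => PySem.List.pySetD ts (PySem.Int.floordiv q.1 (L : Int))
          (PySem.List.pyGetD ts (PySem.Int.floordiv q.1 (L : Int)) "" ++ q.2 ++ " [] 0|0|0\n")) ts).length = ts.length ∧
      ∀ i : Nat, ((PySem.List.enumerate ps (k : Int)).foldl
        (fun ts q => PySem.List.pySetD ts (PySem.Int.floordiv q.1 (L : Int))
          (PySem.List.pyGetD ts (PySem.Int.floordiv q.1 (L : Int)) "" ++ q.2 ++ " [] 0|0|0\n")) ts)[i]? =
        (ts[i]?).map (· ++ pvBody L i k ps) := by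
  intro ps
  induction ps with
  | nil =>
    intro k ts h
    refine ⟨rfl, fun i => ?_⟩
    cases hts : ts[i]? <;> simp [PySem.List.enumerate, pvBody, hts]
  | cons p ps ih =>
    intro k ts h
    rw [PySem.List.enumerate_cons]
    have hcast : ((k : Int) + 1) = ((k + 1 : Nat) : Int) := by push_cast; ring
    simp only [List.foldl_cons, PySem.Int.floordiv_natCast, PySem.List.pySetD_natCast,
      PySem.List.pyGetD_natCast, hcast]
    have hm : k / L < ts.length := by simpa using h 0 (by simp)
    obtain ⟨ihlen, ihget⟩ := ih (k + 1) (ts.set (k / L) (ts.getD (k / L) "" ++ p ++ " [] 0|0|0\n"))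
      (by intro j hj
          simpa [Nat.add_assoc, Nat.add_comm 1 j] using h (j + 1) (by simpa using hj))
    refine ⟨by rw [ihlen]; simp, fun i => ?_⟩
    rw [ihget i]
    by_cases hik : i < ts.length
    · rw [List.getElem?_eq_getElem (by simpa using hik), List.getElem?_eq_getElem hik]
      simp only [Option.map_some, Option.some.injEq, List.getElem_set]
      by_cases hmi : k / L = i
      · have hg : ts.getD (k / L) "" = ts[i]'hik := by
          subst hmi; exact List.getD_eq_getElem ts "" hm
        simp only [if_pos hmi, pvBody, String.append_assoc]
        rw [hg]
      · simp only [if_neg hmi, pvBody, if_neg hmi, String.empty_append]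
    · rw [List.getElem?_eq_none (by simpa using Nat.le_of_not_lt hik),
        List.getElem?_eq_none (Nat.le_of_not_lt hik)]
      rfl



-- flatten of singleton blocks is a map
theorem pvFlatten {α β : Type} (l : List α) (f : α → β) :
    (List.map (fun x => [f x]) l).flatten = List.map f l := by
  induction l with
  | nil => rfl
  | cons x xs ih => simp [ih]

-- the two team lists coincide when players is nonempty
theorem pvMain (nt : Int) (players : List String) (h1 : 1 ≤ nt) (hps : players ≠ []) :
    (PySem.List.pyRange 0 nt 1).foldl (fun acc i =>
        acc ++ [(PySem.List.slice players
            (some (-(PySem.Int.floordiv (-(players.length : Int)) nt) * i))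
            (some (-(PySem.Int.floordiv (-(players.length : Int)) nt) * (i + 1)))).foldl
          (fun t p => t ++ p ++ " [] 0|0|0\n")
          ("Team " ++ PySem.Int.toStr (i + 1) ++ " - " ++ PySem.List.pyGetD pyAlphabet i "" ++ "\n")]) []
    = (PySem.List.enumerate players 0).foldl (fun ts q =>
        PySem.List.pySetD ts (PySem.Int.floordiv q.1 (-(PySem.Int.floordiv (-(players.length : Int)) nt)))
          (PySem.List.pyGetD ts (PySem.Int.floordiv q.1 (-(PySem.Int.floordiv (-(players.length : Int)) nt))) ""
            ++ q.2 ++ " [] 0|0|0\n"))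
        ((PySem.List.pyRange 0 nt 1).map (fun i =>
          "Team " ++ PySem.Int.toStr (i + 1) ++ " - " ++ PySem.List.pyGetD pyAlphabet i "" ++ "\n")) := by
  have hn1 : (1 : Int) ≤ (players.length : Int) := by
    have := List.length_pos_iff.mpr hps
    omega
  set L : Int := -(PySem.Int.floordiv (-(players.length : Int)) nt) with hLdef
  obtain ⟨hc1, hc2⟩ := (PySem.Int.neg_floordiv_neg_eq_iff_of_pos (show (0:Int) < nt by omega)).mp hLdef.symm
  have hLpos : (0 : Int) < L := by
    by_contra hcon
    push_neg at hcon
    nlinarith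
  obtain ⟨LN, hLN⟩ : ∃ m : Nat, (m : Int) = L := ⟨L.toNat, Int.toNat_of_nonneg hLpos.le⟩
  obtain ⟨NT, hNT⟩ : ∃ m : Nat, (m : Int) = nt := ⟨nt.toNat, Int.toNat_of_nonneg (by omega)⟩
  have hLNpos : 0 < LN := by exact_mod_cast hLN ▸ hLpos
  have hbound : players.length ≤ LN * NT := by
    have : (players.length : Int) ≤ (LN : Int) * (NT : Int) := by rw [hLN, hNT]; exact hc2
    exact_mod_cast this
  rw [PySem.List.foldl_append_singleton_eq_map, List.nil_append, ← hLN]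
  have hcond : ∀ j, j < players.length → (0 + j) / LN < ((PySem.List.pyRange 0 nt 1).map (fun i =>
      "Team " ++ PySem.Int.toStr (i + 1) ++ " - " ++ PySem.List.pyGetD pyAlphabet i "" ++ "\n")).length := by
    intro j hj
    rw [Nat.zero_add]
    have hjlt : j / LN < NT :=
      (Nat.div_lt_iff_lt_mul hLNpos).mpr
        (Nat.lt_of_lt_of_le hj (by rw [Nat.mul_comm] at hbound; exact hbound))
    have hlen : ((PySem.List.pyRange 0 nt 1).map (fun i =>
        "Team " ++ PySem.Int.toStr (i + 1) ++ " - " ++ PySem.List.pyGetD pyAlphabet i "" ++ "\n")).length = NT := by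
      simp [PySem.List.length_pyRange_one, ← hNT]
    omega
  obtain ⟨hlen, hget⟩ := pvDist LN hLNpos players 0 _ hcond
  simp only [Nat.cast_zero] at hget
  apply List.ext_getElem?_iff.mpr
  intro i
  rw [List.getElem?_map, hget i, List.getElem?_map, PySem.List.getElem?_pyRange_one]
  by_cases hi : i < (nt - 0).toNat
  · rw [if_pos hi]
    simp only [Option.map_some, Option.some.injEq, zero_add]
    have e1 : (LN : Int) * (i : Int) = ((LN * i : Nat) : Int) := by push_cast; ring
    have e2 : (LN : Int) * ((i : Int) + 1) = ((LN * (i + 1) : Nat) : Int) := by push_cast; ring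
    rw [e1, e2, PySem.List.slice_natCast, pvFoldl_rows, pvBody_eq LN i hLNpos players 0]
    simp
  · rw [if_neg hi]
    rfl

-- ===== VERDICT (by name: the statement is the Claim_ definition above) =====
theorem generate_scoreboard_table_text_spec : Claim_equal_generate_scoreboard_table_text := by
  intro nt players _ hpre
  obtain ⟨h1, h26⟩ := hpre
  unfold Spec_generate_scoreboard_table_text generate_scoreboard_table_text generate_scoreboard_table_text_alt
  by_cases hps : players = []
  · subst hps
    simp [PySem.List.slice, PySem.List.clampIdx]
    rw [pvFlatten]
  · have hBne : players.isEmpty = false := by simp [hps]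
    simp only [hBne, Bool.false_eq_true, if_false]
    rw [pvMain nt players h1 hps]
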